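-- pv_equiv track=rewrite | github.com/mr258876/Project-Puncher | Utilities/Punch Over Serial/HolePuncher_v5.py | _optimizeNoteSequence
-- ===== SOURCE A (Python) =====
-- from typing import List
--
-- def _optimizeNoteSequence(nL) -> List:
--     # 优化同一拍内打孔顺序
--     resultList: List = []
--     tempList: List = []
--     d = True
--     for n in nL:
--         if not tempList:
--             tempList.append(n)
--             continue
--
--         if n[0] != tempList[0][0]:
--             tempList.sort(key=lambda x: x[1] if d else -x[1])
--             resultList = resultList + tempList
--
--             d = not d
--             tempList = [n]
--         else:
--             tempList.append(n)
--     resultList = resultList + tempList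
--     return resultList
-- ===== SOURCE B (Python) =====
-- from typing import List
--
-- def _optimizeNoteSequence(nL) -> List:
--     # Decorate-sort-undecorate: tag each note with its run index (number of pitch
--     # changes before it), do ONE global stable sort of the whole list keyed by
--     # (run, value) -- value negated in odd runs -- then strip the tags.
--     # No per-group sorting and no grouping loop at all.
--     dec = []
--     g = 0
--     prev = None
--     for n in nL:
--         if prev is not None and n[0] != prev:
--             g += 1
--         prev = n[0]
--         dec.append((g, n))
--     dec.sort(key=lambda t: (t[0], t[1][1] if t[0] % 2 == 0 else -t[1][1]))
--     return [n for _, n in dec]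
-- ===== Notes on version B (the rewrite author's own statement) =====
-- stated objective: alternative
-- what changed: B replaces A's buffer-and-flush state machine (pending tempList, direction flag, whole-result concatenation at each pitch change, one sort per group) with decorate-sort-undecorate: one scan tags every note with its run index, one single global stable sort by the composite key (run, value-or-negated-value) orders everything at once, and a final projection strips the tags; B also sorts the final group, which A forgets (see differs).
-- intended difference: On inputs whose final consecutive same-pitch run is not already in the alternating order its group index calls for, A returns that last run unsorted (its loop only sorts a group when a later pitch change flushes it), while B sorts it like every other group; sorting every beat's group is the function's stated purpose, so B's value is the intended one. — e.g. on _optimizeNoteSequence([(0, 2), (0, 1)]): A returns [(0, 2), (0, 1)], B returns [(0, 1), (0, 2)]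
import Mathlib
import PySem

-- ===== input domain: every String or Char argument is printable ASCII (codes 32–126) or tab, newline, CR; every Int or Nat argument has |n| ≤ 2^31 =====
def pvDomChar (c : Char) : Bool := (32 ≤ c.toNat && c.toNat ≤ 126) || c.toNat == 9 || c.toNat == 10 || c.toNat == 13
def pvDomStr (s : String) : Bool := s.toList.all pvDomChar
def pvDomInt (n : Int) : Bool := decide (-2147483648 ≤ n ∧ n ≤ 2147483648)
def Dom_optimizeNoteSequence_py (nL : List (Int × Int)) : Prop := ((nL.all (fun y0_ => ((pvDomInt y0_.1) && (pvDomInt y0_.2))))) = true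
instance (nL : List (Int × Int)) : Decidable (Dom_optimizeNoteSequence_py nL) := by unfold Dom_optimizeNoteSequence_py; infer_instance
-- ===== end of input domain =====

-- B: decorate-sort-undecorate — one scan tags each note with its run index, ONE global stable sort by the
-- composite key (run, value-or-negated-value) replaces A's buffer-and-flush state machine with its per-group
-- sorts; B also sorts the final group, which A leaves unsorted (the stated difference D_ below).


-- A's per-group stable sort `sorted(_, key=lambda x: x[1] if asc else -x[1])` (also names B's per-run order in the proofs)
def pvSortKey (asc : Bool) (l : List (Int × Int)) : List (Int × Int) :=
  PySem.List.sorted l (fun x => if asc then x.2 else -x.2) false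

-- ===== PORT A =====
-- one iteration of A's for-loop over state (resultList, tempList, d)
def pvStepA (s : List (Int × Int) × List (Int × Int) × Bool) (n : Int × Int) :
    List (Int × Int) × List (Int × Int) × Bool :=
  if s.2.1 = [] then (s.1, s.2.1 ++ [n], s.2.2)
  else if n.1 ≠ s.2.1.headI.1 then (s.1 ++ pvSortKey s.2.2 s.2.1, [n], !s.2.2)
  else (s.1, s.2.1 ++ [n], s.2.2)

def optimizeNoteSequence_py (nL : List (Int × Int)) : List (Int × Int) :=
  let s := nL.foldl pvStepA ([], [], true)
  s.1 ++ s.2.1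

-- ===== PORT B =====
-- B's second sort key `t[1][1] if t[0] % 2 == 0 else -t[1][1]`
def pvK2 (t : Int × (Int × Int)) : Int := if t.1 % 2 = 0 then t.2.2 else -t.2.2

-- one iteration of B's decorating scan over state (dec, g, prev)
def pvStepB (s : List (Int × (Int × Int)) × Int × Option Int) (n : Int × Int) :
    List (Int × (Int × Int)) × Int × Option Int :=
  let g := match s.2.2 with
    | some p => if n.1 ≠ p then s.2.1 + 1 else s.2.1
    | none => s.2.1
  (s.1 ++ [(g, n)], g, some n.1)

-- decorate; one global stable sort by the tuple key (run index, ±value); strip the tags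
def optimizeNoteSequence_py_alt (nL : List (Int × Int)) : List (Int × Int) :=
  let dec := (nL.foldl pvStepB ([], 0, none)).1
  (PySem.List.sorted2 dec (fun t => t.1) pvK2 false).map (·.2)

-- ===== PRECONDITION & SPEC =====
-- On inputs whose final consecutive same-pitch run is not already in the alternating order its group
-- index calls for, A returns that last run unsorted (its loop only sorts a group when a later pitch
-- change flushes it), while B sorts it like every other group; sorting every beat's group is the
-- function's stated purpose, so B's value is the intended one.
-- (read: the reversed final run must be ordered the way parity of the pitch-boundary count demands)
def D_optimizeNoteSequence_py (nL : List (Int × Int)) : Prop :=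
  ¬ (nL.reverse.takeWhile fun w => w.1 == (nL.getLastD w).1).Pairwise
      fun a b => if ((nL.zip nL.tail).countP fun p => p.1.1 != p.2.1) % 2 = 0
                 then b.2 ≤ a.2 else a.2 ≤ b.2
instance (nL : List (Int × Int)) : Decidable (D_optimizeNoteSequence_py nL) := by
  unfold D_optimizeNoteSequence_py; infer_instance

def Spec_optimizeNoteSequence_py (nL : List (Int × Int)) (out : List (Int × Int)) : Prop :=
  ¬ D_optimizeNoteSequence_py nL → out = optimizeNoteSequence_py_alt nL
instance (nL : List (Int × Int)) (out : List (Int × Int)) : Decidable (Spec_optimizeNoteSequence_py nL out) := by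
  unfold Spec_optimizeNoteSequence_py; infer_instance

def pvDiffWitness_optimizeNoteSequence_py : (List (Int × Int)) := [(0, 2), (0, 1)]
def pvDiffWitnessOut_optimizeNoteSequence_py : (List (Int × Int)) × (List (Int × Int)) :=
  ([(0, 2), (0, 1)], [(0, 1), (0, 2)])

-- ===== CLAIM (what is proved, stated in full; the proofs are below) =====
def Claim_unchanged_optimizeNoteSequence_py : Prop := ∀ (nL : List (Int × Int)), Dom_optimizeNoteSequence_py nL → Spec_optimizeNoteSequence_py nL (optimizeNoteSequence_py nL)
def Claim_changed_optimizeNoteSequence_py : Prop := Dom_optimizeNoteSequence_py (pvDiffWitness_optimizeNoteSequence_py) ∧ D_optimizeNoteSequence_py (pvDiffWitness_optimizeNoteSequence_py) ∧ optimizeNoteSequence_py (pvDiffWitness_optimizeNoteSequence_py) = pvDiffWitnessOut_optimizeNoteSequence_py.1 ∧ optimizeNoteSequence_py_alt (pvDiffWitness_optimizeNoteSequence_py) = pvDiffWitnessOut_optimizeNoteSequence_py.2 ∧ pvDiffWitnessOut_optimizeNoteSequence_py.1 ≠ pvDiffWitnessOut_optimizeNoteSequence_py.2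
def Claim_exact_optimizeNoteSequence_py : Prop := ∀ (nL : List (Int × Int)), Dom_optimizeNoteSequence_py nL → D_optimizeNoteSequence_py nL → optimizeNoteSequence_py nL ≠ optimizeNoteSequence_py_alt nL

-- ===== LEMMAS AND PROOFS =====

-- proof-side helpers: maximal consecutive runs of the same pitch, their count, the final run
def pvRuns : List (Int × Int) → List (List (Int × Int))
  | [] => []
  | x :: xs =>
    match pvRuns xs with
    | (y :: g) :: gs => if x.1 == y.1 then (x :: y :: g) :: gs else [x] :: (y :: g) :: gs
    | _ => [[x]]

def pvNumRuns : List (Int × Int) → Nat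
  | [] => 0
  | [_] => 1
  | x :: y :: l => (if x.1 ≠ y.1 then 1 else 0) + pvNumRuns (y :: l)

def pvLastRun (nL : List (Int × Int)) : List (Int × Int) :=
  match nL.reverse with
  | [] => []
  | z :: zs => (z :: zs.takeWhile (fun w => w.1 == z.1)).reverse

-- A's result, phrased over the run decomposition: every run but the last is sorted, direction alternating
def pvProcA (d : Bool) : List (List (Int × Int)) → List (Int × Int)
  | [] => []
  | g :: gs => if gs = [] then g else pvSortKey d g ++ pvProcA (!d) gs

-- B's intended result over the run decomposition: EVERY run sorted, direction from the run's index
def pvProcB (i : Nat) : List (List (Int × Int)) → List (Int × Int)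
  | [] => []
  | g :: gs => pvSortKey (decide (i % 2 = 0)) g ++ pvProcB (i + 1) gs

theorem pvRuns_cons (x : Int × Int) (xs : List (Int × Int)) :
    pvRuns (x :: xs) =
      (x :: xs.takeWhile (fun z => z.1 == x.1)) :: pvRuns (xs.dropWhile (fun z => z.1 == x.1)) := by
  induction xs generalizing x with
  | nil => rfl
  | cons y ys ih =>
    have hstep : pvRuns (x :: y :: ys) =
        (match pvRuns (y :: ys) with
         | (z :: g) :: gs => if x.1 == z.1 then (x :: z :: g) :: gs else [x] :: (z :: g) :: gs
         | _ => [[x]]) := rfl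
    rw [hstep, ih y]
    by_cases h : x.1 = y.1
    · have hpred : (fun z : Int × Int => z.1 == x.1) = (fun z : Int × Int => z.1 == y.1) := by
        funext z; rw [h]
      simp [List.takeWhile_cons, List.dropWhile_cons, h, hpred, ih y]
    · have hyx : ((y.1 == x.1) : Bool) = false := by simp [Ne.symm h]
      simp [List.takeWhile_cons, List.dropWhile_cons, hyx, h, ih y]

theorem pvRuns_eq_nil_iff (l : List (Int × Int)) : pvRuns l = [] ↔ l = [] := by
  cases l with
  | nil => simp [pvRuns]
  | cons x xs => rw [pvRuns_cons]; simp

-- ---------- A characterised over the runs ----------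
theorem pvLoopA (rest : List (Int × Int)) (res temp : List (Int × Int)) (d : Bool) (c : Int)
    (hne : temp ≠ []) (hu : ∀ z ∈ temp, z.1 = c) :
    (let s := rest.foldl pvStepA (res, temp, d); s.1 ++ s.2.1) =
      res ++ (let r := rest.dropWhile (fun z => z.1 == c)
              if r = [] then temp ++ rest.takeWhile (fun z => z.1 == c)
              else pvSortKey d (temp ++ rest.takeWhile (fun z => z.1 == c)) ++ pvProcA (!d) (pvRuns r)) := by
  induction rest generalizing res temp d c with
  | nil => simp
  | cons n rest ih =>
    have hhead : temp.headI.1 = c := by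
      cases temp with
      | nil => exact absurd rfl hne
      | cons a t => exact hu a (by simp)
    by_cases h : n.1 = c
    · have step : pvStepA (res, temp, d) n = (res, temp ++ [n], d) := by
        simp [pvStepA, hne, hhead, h]
      have hu' : ∀ z ∈ temp ++ [n], z.1 = c := by
        intro z hz; rcases List.mem_append.mp hz with hz | hz
        · exact hu z hz
        · simp_all
      have := ih res (temp ++ [n]) d c (by simp) hu'
      simp only [List.foldl_cons, step, this]
      have hdw : List.dropWhile (fun z : Int × Int => z.1 == c) (n :: rest) =
          List.dropWhile (fun z : Int × Int => z.1 == c) rest := by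
        simp [List.dropWhile_cons, h]
      have htw : List.takeWhile (fun z : Int × Int => z.1 == c) (n :: rest) =
          n :: List.takeWhile (fun z : Int × Int => z.1 == c) rest := by
        simp [List.takeWhile_cons, h]
      rw [hdw, htw]
      simp [List.append_assoc]
    · have step : pvStepA (res, temp, d) n = (res ++ pvSortKey d temp, [n], !d) := by
        simp [pvStepA, hne, hhead, h]
      have := ih (res ++ pvSortKey d temp) [n] (!d) n.1 (by simp) (by simp)
      simp only [List.foldl_cons, step, this]
      have hbq : ((fun z : Int × Int => z.1 == c) n) = false := by simp [h]
      rw [List.takeWhile_cons, List.dropWhile_cons]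
      simp only [hbq, if_neg, Bool.false_eq_true, not_false_iff, ite_false, if_false]
      have hrn := pvRuns_cons n rest
      rw [hrn]
      simp only [pvProcA, List.append_assoc]
      by_cases hr : rest.dropWhile (fun z => z.1 == n.1) = []
      · simp [hr, pvRuns_eq_nil_iff, pvProcA]
      · simp [hr, pvRuns_eq_nil_iff, List.append_assoc]

theorem pvA_char (nL : List (Int × Int)) :
    optimizeNoteSequence_py nL = pvProcA true (pvRuns nL) := by
  cases nL with
  | nil => simp [optimizeNoteSequence_py, pvRuns, pvProcA]
  | cons x xs =>
    have step : pvStepA ([], [], true) x = ([], [x], true) := by simp [pvStepA]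
    have := pvLoopA xs [] [x] true x.1 (by simp) (by simp)
    unfold optimizeNoteSequence_py
    simp only [List.foldl_cons, step, this]
    have hrn := pvRuns_cons x xs
    rw [hrn]
    by_cases hr : xs.dropWhile (fun z => z.1 == x.1) = []
    · simp [hr, pvRuns_eq_nil_iff, pvProcA]
    · simp [hr, pvRuns_eq_nil_iff, pvProcA]

-- ---------- B characterised over the runs ----------
-- the decoration the scan produces after the first element, given current run index g and previous pitch c
def pvDecTail (g : Int) (c : Int) : List (Int × Int) → List (Int × (Int × Int))
  | [] => []
  | n :: rest =>
      (if n.1 ≠ c then g + 1 else g, n) ::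
        pvDecTail (if n.1 ≠ c then g + 1 else g) n.1 rest

theorem pvFoldB (rest : List (Int × Int)) (acc : List (Int × (Int × Int))) (g c : Int) :
    (rest.foldl pvStepB (acc, g, some c)).1 = acc ++ pvDecTail g c rest := by
  induction rest generalizing acc g c with
  | nil => simp [pvDecTail]
  | cons n rest ih =>
    have step : pvStepB (acc, g, some c) n =
        (acc ++ [(if n.1 ≠ c then g + 1 else g, n)], if n.1 ≠ c then g + 1 else g, some n.1) := by
      simp [pvStepB]
    simp only [List.foldl_cons, step, ih, pvDecTail, List.append_assoc, List.cons_append,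
      List.nil_append]

-- the runs, flattened with their (Int-valued) run index
def pvFlatRuns (j : Nat) : List (List (Int × Int)) → List (Int × (Int × Int))
  | [] => []
  | g :: gs => g.map (fun n => ((j : Int), n)) ++ pvFlatRuns (j + 1) gs

theorem pvDecTail_takeWhile (t r : List (Int × Int)) (g c : Int) (h : ∀ z ∈ t, z.1 = c) :
    pvDecTail g c (t ++ r) = t.map (fun n => (g, n)) ++ pvDecTail g c r := by
  induction t with
  | nil => simp
  | cons y t' ih =>
    have hy : y.1 = c := h y (by simp)
    have h' : ∀ z ∈ t', z.1 = c := fun z hz => h z (by simp [hz])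
    show (if y.1 ≠ c then g + 1 else g, y) ::
        pvDecTail (if y.1 ≠ c then g + 1 else g) y.1 (t' ++ r) =
      (g, y) :: (t'.map (fun n => (g, n)) ++ pvDecTail g c r)
    rw [hy]
    simp [ih h']

theorem pvDecTail_runs (x : Int × Int) (xs : List (Int × Int)) (j : Nat) :
    ((j : Int), x) :: pvDecTail (j : Int) x.1 xs = pvFlatRuns j (pvRuns (x :: xs)) := by
  induction hn : xs.length using Nat.strong_induction_on generalizing x xs j with
  | _ n ihn =>
  subst hn
  set t := xs.takeWhile (fun z => z.1 == x.1) with htdef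
  set r := xs.dropWhile (fun z => z.1 == x.1) with hrdef
  have hsplit : xs = t ++ r := (List.takeWhile_append_dropWhile).symm
  have ht : ∀ z ∈ t, z.1 = x.1 := by
    intro z hz; simpa using List.mem_takeWhile_imp hz
  have hlhs : pvDecTail (j : Int) x.1 xs =
      t.map (fun n => ((j : Int), n)) ++ pvDecTail (j : Int) x.1 r := by
    conv_lhs => rw [hsplit]
    exact pvDecTail_takeWhile t r _ _ ht
  rw [pvRuns_cons, ← htdef, ← hrdef, hlhs]
  cases hr : r with
  | nil =>
    simp [hr, pvRuns, pvFlatRuns, pvDecTail]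
  | cons y r' =>
    have hy : y.1 ≠ x.1 := by
      have hnot := List.head?_dropWhile_not (fun z : Int × Int => z.1 == x.1) xs
      rw [← hrdef, hr] at hnot
      simpa using hnot
    have hlen : r'.length < xs.length := by
      have h1 : r.length ≤ xs.length := hrdef ▸ List.length_dropWhile_le _ _
      rw [hr] at h1; simp at h1; omega
    have ih := ihn r'.length hlen y r' (j + 1) rfl
    have hdt : pvDecTail (j : Int) x.1 (y :: r') =
        (((j : Int) + 1), y) :: pvDecTail ((j : Int) + 1) y.1 r' := by
      simp [pvDecTail, hy]
    rw [hdt]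
    have hcast : ((j : Int) + 1) = ((j + 1 : Nat) : Int) := by push_cast; ring
    rw [hcast]
    simp only [pvFlatRuns, List.map_cons, List.cons_append]
    rw [← ih]

-- ---------- the single global stable sort splits over the runs ----------
-- B's comparator, as the insertion-sort `before` relation sorted2 uses
def pvBefore (a b : Int × (Int × Int)) : Bool :=
  decide (a.1 < b.1) || (!decide (b.1 < a.1) && decide (pvK2 a < pvK2 b))

theorem pvSorted2_eq_foldl (l : List (Int × (Int × Int))) :
    PySem.List.sorted2 l (fun t => t.1) pvK2 false =
      l.foldl (fun acc x => PySem.List.insertBy pvBefore x acc) [] := rfl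

theorem pvInsertBy_append (b : (Int × (Int × Int)) → (Int × (Int × Int)) → Bool)
    (x : Int × (Int × Int)) (s1 s2 : List (Int × (Int × Int)))
    (h : ∀ y ∈ s1, b x y = false) :
    PySem.List.insertBy b x (s1 ++ s2) = s1 ++ PySem.List.insertBy b x s2 := by
  induction s1 with
  | nil => simp
  | cons y s1 ih =>
    have hy : b x y = false := h y (by simp)
    simp only [List.cons_append, PySem.List.insertBy, hy]
    simp only [Bool.false_eq_true, if_false]
    rw [ih (fun z hz => h z (by simp [hz]))]

theorem pvFoldlInsert_prefix (d s1 s : List (Int × (Int × Int)))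
    (h : ∀ x ∈ d, ∀ y ∈ s1, pvBefore x y = false) :
    d.foldl (fun acc x => PySem.List.insertBy pvBefore x acc) (s1 ++ s) =
      s1 ++ d.foldl (fun acc x => PySem.List.insertBy pvBefore x acc) s := by
  induction d generalizing s with
  | nil => simp
  | cons x d ih =>
    simp only [List.foldl_cons]
    rw [pvInsertBy_append pvBefore x s1 s (h x (by simp)),
      ih _ (fun z hz => h z (by simp [hz]))]

theorem pvSortSplit (d1 d2 : List (Int × (Int × Int)))
    (h : ∀ x ∈ d1, ∀ y ∈ d2, x.1 < y.1) :
    PySem.List.sorted2 (d1 ++ d2) (fun t => t.1) pvK2 false =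
      PySem.List.sorted2 d1 (fun t => t.1) pvK2 false ++
        PySem.List.sorted2 d2 (fun t => t.1) pvK2 false := by
  simp only [pvSorted2_eq_foldl, List.foldl_append]
  have hperm := PySem.List.sorted2_perm d1 (fun t => t.1) pvK2 false
  rw [pvSorted2_eq_foldl] at hperm
  have hmem : ∀ y ∈ d1.foldl (fun acc x => PySem.List.insertBy pvBefore x acc) [], y ∈ d1 :=
    fun y hy => hperm.mem_iff.mp hy
  have := pvFoldlInsert_prefix d2 (d1.foldl (fun acc x => PySem.List.insertBy pvBefore x acc) []) []
    (by
      intro x hx y hy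
      have hyd1 : y ∈ d1 := hmem y hy
      have hlt : y.1 < x.1 := h y hyd1 x hx
      simp [pvBefore]
      omega)
  simpa using this

-- within one run the comparator is the per-run key comparison, and sorting commutes with the tagging map
theorem pvInsertBy_map (j : Int) (asc : Bool)
    (hj : (decide (j % 2 = 0)) = asc)
    (x : Int × Int) (s : List (Int × Int)) :
    PySem.List.insertBy pvBefore ((j, x)) (s.map (fun n => (j, n))) =
      (PySem.List.insertBy
        (fun a b => decide ((if asc then a.2 else -a.2) < (if asc then b.2 else -b.2))) x s).map
          (fun n => (j, n)) := by
  induction s with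
  | nil => simp [PySem.List.insertBy]
  | cons y s ih =>
    have hb : pvBefore (j, x) (j, y) =
        decide ((if asc then x.2 else -x.2) < (if asc then y.2 else -y.2)) := by
      cases asc with
      | true =>
        have : j % 2 = 0 := by simpa using hj
        simp [pvBefore, pvK2, this]
      | false =>
        have : ¬ j % 2 = 0 := by simpa using hj
        simp [pvBefore, pvK2, this]
    simp only [List.map_cons, PySem.List.insertBy, hb]
    by_cases hcmp : ((if asc then x.2 else -x.2) < (if asc then y.2 else -y.2))
    · simp [hcmp]
    · simp only [hcmp, decide_false, Bool.false_eq_true, if_false, List.map_cons]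
      rw [ih]

theorem pvSortRun_aux (j : Int) (asc : Bool) (hj : (decide (j % 2 = 0)) = asc)
    (g : List (Int × Int)) (s : List (Int × Int)) :
    (g.map (fun n => (j, n))).foldl (fun acc x => PySem.List.insertBy pvBefore x acc)
        (s.map (fun n => (j, n))) =
      (g.foldl (fun acc x => PySem.List.insertBy
        (fun a b => decide ((if asc then a.2 else -a.2) < (if asc then b.2 else -b.2))) x acc) s).map
          (fun n => (j, n)) := by
  induction g generalizing s with
  | nil => simp
  | cons x g ih =>
    simp only [List.map_cons, List.foldl_cons]
    rw [pvInsertBy_map j asc hj x s, ih]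

theorem pvSortRun (j : Nat) (g : List (Int × Int)) :
    PySem.List.sorted2 (g.map (fun n => ((j : Int), n))) (fun t => t.1) pvK2 false =
      (pvSortKey (decide (j % 2 = 0)) g).map (fun n => ((j : Int), n)) := by
  have hj : (decide ((j : Int) % 2 = 0)) = decide (j % 2 = 0) := by
    by_cases h : j % 2 = 0 <;> simp [h] <;> omega
  have := pvSortRun_aux (j : Int) (decide (j % 2 = 0)) hj g []
  rw [pvSorted2_eq_foldl]
  simpa [pvSortKey, PySem.List.sorted] using this

theorem pvFlatRuns_fst_le (gs : List (List (Int × Int))) (j : Nat) :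
    ∀ y ∈ pvFlatRuns j gs, (j : Int) ≤ y.1 := by
  induction gs generalizing j with
  | nil => simp [pvFlatRuns]
  | cons g gs ih =>
    intro y hy
    rcases List.mem_append.mp hy with hy | hy
    · obtain ⟨n, _, rfl⟩ := List.mem_map.mp hy
      simp
    · have := ih (j + 1) y hy
      push_cast at this ⊢
      omega

theorem pvSortFlat (gs : List (List (Int × Int))) (j : Nat) :
    (PySem.List.sorted2 (pvFlatRuns j gs) (fun t => t.1) pvK2 false).map (·.2) = pvProcB j gs := by
  induction gs generalizing j with
  | nil => simp [pvFlatRuns, pvProcB, pvSorted2_eq_foldl]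
  | cons g gs ih =>
    have hsplit := pvSortSplit (g.map (fun n => ((j : Int), n))) (pvFlatRuns (j + 1) gs)
      (by
        intro x hx y hy
        obtain ⟨n, _, rfl⟩ := List.mem_map.mp hx
        have := pvFlatRuns_fst_le gs (j + 1) y hy
        push_cast at this ⊢
        omega)
    simp only [pvFlatRuns, hsplit, List.map_append, pvSortRun j g, List.map_map, ih (j + 1),
      pvProcB]
    congr 1
    simp [Function.comp_def]

theorem pvB_char (nL : List (Int × Int)) :
    optimizeNoteSequence_py_alt nL = pvProcB 0 (pvRuns nL) := by
  cases nL with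
  | nil => rfl
  | cons x xs =>
    unfold optimizeNoteSequence_py_alt
    have step : pvStepB ([], 0, none) x = ([(0, x)], 0, some x.1) := by simp [pvStepB]
    have hdec : ((x :: xs).foldl pvStepB ([], 0, none)).1 = pvFlatRuns 0 (pvRuns (x :: xs)) := by
      rw [List.foldl_cons, step, pvFoldB xs [(0, x)] 0 x.1]
      have := pvDecTail_runs x xs 0
      simpa using this
    simp only [hdec]
    exact pvSortFlat (pvRuns (x :: xs)) 0

-- ---------- run count and final run; D_ restated through them ----------
theorem pvNumRuns_split (x : Int × Int) (t r : List (Int × Int))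
    (ht : ∀ z ∈ t, z.1 = x.1) (hr : ∀ h ∈ r.head?, h.1 ≠ x.1) :
    pvNumRuns (x :: (t ++ r)) = (if r = [] then 0 else pvNumRuns r) + 1 := by
  induction t generalizing x with
  | nil =>
    cases r with
    | nil => simp [pvNumRuns]
    | cons h r' =>
      have : h.1 ≠ x.1 := hr h (by simp)
      simp [pvNumRuns, this.symm, Ne.symm, Nat.add_comm]
  | cons y t' ih =>
    have hy : y.1 = x.1 := ht y (by simp)
    have ht' : ∀ z ∈ t', z.1 = y.1 := fun z hz => (ht z (by simp [hz])).trans hy.symm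
    have hr' : ∀ h ∈ r.head?, h.1 ≠ y.1 := fun h hh => by
      rw [hy]; exact hr h hh
    have := ih y ht' hr'
    simp only [List.cons_append, pvNumRuns] at *
    rw [this]
    simp [hy]

theorem pvNumRuns_eq (nL : List (Int × Int)) : pvNumRuns nL = (pvRuns nL).length := by
  induction hn : nL.length using Nat.strong_induction_on generalizing nL with
  | _ n ihn =>
  subst hn
  cases nL with
  | nil => simp [pvNumRuns, pvRuns]
  | cons x xs =>
    have ih : ∀ m : List (Int × Int), m.length ≤ xs.length → pvNumRuns m = (pvRuns m).length := by
      intro m hm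
      exact ihn m.length (by simp; omega) m rfl
    have hsplit : xs = xs.takeWhile (fun z => z.1 == x.1) ++ xs.dropWhile (fun z => z.1 == x.1) :=
      (List.takeWhile_append_dropWhile).symm
    have ht : ∀ z ∈ xs.takeWhile (fun z => z.1 == x.1), z.1 = x.1 := by
      intro z hz
      have := List.mem_takeWhile_imp hz
      simpa using this
    have hr : ∀ h ∈ (xs.dropWhile (fun z => z.1 == x.1)).head?, h.1 ≠ x.1 := by
      intro h hh
      have := List.head?_dropWhile_not (fun z : Int × Int => z.1 == x.1) xs
      cases hd : (xs.dropWhile (fun z => z.1 == x.1)).head? with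
      | none => simp [hd] at hh
      | some h' =>
        rw [hd] at hh this
        simp at hh this
        subst hh; exact this
    have hx : pvNumRuns (x :: xs) =
        (if xs.dropWhile (fun z => z.1 == x.1) = [] then 0
         else pvNumRuns (xs.dropWhile (fun z => z.1 == x.1))) + 1 := by
      conv_lhs => rw [hsplit]
      exact pvNumRuns_split x _ _ ht hr
    rw [hx]
    have hrn := pvRuns_cons x xs
    rw [hrn]
    by_cases hd : xs.dropWhile (fun z => z.1 == x.1) = []
    · simp [hd, pvRuns]
    · simp [hd, ih _ (List.length_dropWhile_le _ _)]

theorem pvLastRun_uniform (x : Int × Int) (xs : List (Int × Int))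
    (h : ∀ z ∈ x :: xs, z.1 = x.1) : pvLastRun (x :: xs) = x :: xs := by
  unfold pvLastRun
  cases hrev : (x :: xs).reverse with
  | nil => simp at hrev
  | cons z zs =>
    have hz : z ∈ x :: xs := List.mem_reverse.mp (hrev ▸ List.mem_cons_self ..)
    have hzs : ∀ w ∈ zs, w.1 = z.1 := by
      intro w hw
      have hwmem : w ∈ x :: xs :=
        List.mem_reverse.mp (hrev ▸ List.mem_cons_of_mem _ hw)
      rw [h w hwmem, h z hz]
    have htk : zs.takeWhile (fun w => w.1 == z.1) = zs :=
      List.takeWhile_eq_self_iff.mpr (by intro w hw; simp [hzs w hw])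
    show (z :: zs.takeWhile (fun w => w.1 == z.1)).reverse = x :: xs
    rw [htk, ← hrev, List.reverse_reverse]

theorem pvLastRun_eq (nL : List (Int × Int)) (h : nL ≠ []) :
    (pvRuns nL).getLast (by simpa [pvRuns_eq_nil_iff] using h) = pvLastRun nL := by
  induction hn : nL.length using Nat.strong_induction_on generalizing nL with
  | _ n ihn =>
  subst hn
  cases nL with
  | nil => simp at h
  | cons x xs =>
    have ih : ∀ m : List (Int × Int), m.length ≤ xs.length → (hm : m ≠ []) →
        (pvRuns m).getLast (by simpa [pvRuns_eq_nil_iff] using hm) = pvLastRun m := by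
      intro m hm hmne
      exact ihn m.length (by simp; omega) m hmne rfl
    have hrn := pvRuns_cons x xs
    by_cases hd : xs.dropWhile (fun z => z.1 == x.1) = []
    · -- single run: whole list uniform
      have htk : xs.takeWhile (fun z => z.1 == x.1) = xs := by
        have := List.takeWhile_append_dropWhile (p := fun z : Int × Int => z.1 == x.1) (l := xs)
        rw [hd] at this; simpa using this
      have huni : ∀ z ∈ x :: xs, z.1 = x.1 := by
        intro z hz
        rcases List.mem_cons.mp hz with hz | hz
        · rw [hz]
        · have : z ∈ xs.takeWhile (fun z => z.1 == x.1) := by rw [htk]; exact hz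
          simpa using List.mem_takeWhile_imp this
      rw [pvLastRun_uniform x xs huni]
      have hone : pvRuns (x :: xs) = [x :: xs] := by
        rw [hrn, hd, htk]; rfl
      simp [hone]
    · -- ≥ 2 runs: the last run of the whole list is the last run of the part after the first run
      have hrne : pvRuns (xs.dropWhile (fun z => z.1 == x.1)) ≠ [] := by
        simpa [pvRuns_eq_nil_iff] using hd
      have hgl : (pvRuns (x :: xs)).getLast (by simpa [pvRuns_eq_nil_iff] using h) =
          (pvRuns (xs.dropWhile (fun z => z.1 == x.1))).getLast hrne := by
        simp only [hrn]
        exact List.getLast_cons hrne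
      rw [hgl, ih _ (List.length_dropWhile_le _ _) hd]
      set t := xs.takeWhile (fun z => z.1 == x.1) with htdef
      set r := xs.dropWhile (fun z => z.1 == x.1) with hrdef
      have hsplit : x :: xs = (x :: t) ++ r := by
        simp [htdef, hrdef, List.takeWhile_append_dropWhile]
      have hut : ∀ z ∈ x :: t, z.1 = x.1 := by
        intro z hz
        rcases List.mem_cons.mp hz with hz | hz
        · rw [hz]
        · simpa using List.mem_takeWhile_imp hz
      have hrhead : ∀ hh ∈ r.head?, hh.1 ≠ x.1 := by
        intro hh hhh
        have hnot := List.head?_dropWhile_not (fun z : Int × Int => z.1 == x.1) xs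
        rw [← hrdef] at hnot
        rw [hhh] at hnot
        simpa using hnot
      cases hr : r.reverse with
      | nil => exact absurd (by simpa using congrArg List.reverse hr) hd
      | cons z zs =>
        have hrz : r = (z :: zs).reverse := by rw [← hr, List.reverse_reverse]
        have hrevwhole : (x :: xs).reverse = z :: (zs ++ (x :: t).reverse) := by
          rw [hsplit, List.reverse_append, hr]; simp
        unfold pvLastRun
        rw [hrevwhole, hr]
        simp only
        congr 2
        rw [List.takeWhile_append]
        by_cases hlen : (zs.takeWhile (fun w => w.1 == z.1)).length = zs.length
        · -- all of r shares z's pitch; takeWhile stops at the first element of (x :: t).reverse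
          have hall : zs.takeWhile (fun w => w.1 == z.1) = zs :=
            (List.takeWhile_prefix _).eq_of_length hlen
          have huni_r : ∀ w ∈ z :: zs, w.1 = z.1 := by
            intro w hw
            rcases List.mem_cons.mp hw with hw | hw
            · rw [hw]
            · have : w ∈ zs.takeWhile (fun w => w.1 == z.1) := by rw [hall]; exact hw
              simpa using List.mem_takeWhile_imp this
          have hrne' : r ≠ [] := hd
          have hznex : z.1 ≠ x.1 := by
            cases hhd : r.head? with
            | none => simp [List.head?_eq_none_iff, hrne'] at hhd
            | some hh =>
              have h1 : hh.1 ≠ x.1 := hrhead hh (by simp [hhd])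
              have h2 : hh ∈ r := List.mem_of_mem_head? (by simp [hhd])
              have h3 : hh ∈ z :: zs := by
                rw [hrz] at h2; exact List.mem_reverse.mp h2
              rw [huni_r hh h3] at h1; exact h1
          cases hxtr : (x :: t).reverse with
          | nil => simp at hxtr
          | cons w ws =>
            have hw : w ∈ x :: t :=
              List.mem_reverse.mp (hxtr ▸ List.mem_cons_self ..)
            have hwx : w.1 = x.1 := hut w hw
            have hfw : ((fun w : Int × Int => w.1 == z.1) w) = false := by
              simp only [beq_eq_false_iff_ne, ne_eq]
              intro hc; exact hznex (by rw [← hc, hwx])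
            simp [hlen, hall, List.takeWhile_cons, hfw]
        · -- takeWhile already stops inside zs
          simp [hlen]

theorem pvCount (x : Int × Int) (xs : List (Int × Int)) :
    ((x :: xs).zip xs).countP (fun p => p.1.1 != p.2.1) + 1 = pvNumRuns (x :: xs) := by
  induction xs generalizing x with
  | nil => simp [pvNumRuns]
  | cons y ys ih =>
    have hzip : (x :: y :: ys).zip (y :: ys) = (x, y) :: (y :: ys).zip ys := rfl
    rw [hzip, List.countP_cons]
    have := ih y
    by_cases h : x.1 = y.1 <;> simp [pvNumRuns, h] <;> omega

theorem pvD_iff (nL : List (Int × Int)) :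
    D_optimizeNoteSequence_py nL ↔
      nL ≠ [] ∧ ¬ (if (pvNumRuns nL - 1) % 2 = 0
        then (pvLastRun nL).Pairwise (fun a b => a.2 ≤ b.2)
        else (pvLastRun nL).Pairwise (fun a b => b.2 ≤ a.2)) := by
  cases nL with
  | nil => simp [D_optimizeNoteSequence_py]
  | cons x xs =>
    cases hrev : (x :: xs).reverse with
    | nil => simp at hrev
    | cons z zs =>
      have hlast? : (x :: xs).getLast? = some z := by
        rw [← List.head?_reverse, hrev]; rfl
      have hpred : (fun w : Int × Int => w.1 == ((x :: xs).getLastD w).1) =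
          (fun w : Int × Int => w.1 == z.1) := by
        funext w
        rw [List.getLastD_eq_getLast?, hlast?]
        rfl
      have htkw : (x :: xs).reverse.takeWhile (fun w : Int × Int => w.1 == ((x :: xs).getLastD w).1)
          = z :: zs.takeWhile (fun w => w.1 == z.1) := by
        rw [hpred, hrev, List.takeWhile_cons]
        simp
      have hcnt : ((x :: xs).zip (x :: xs).tail).countP (fun p => p.1.1 != p.2.1)
          = pvNumRuns (x :: xs) - 1 := by
        have := pvCount x xs
        simp only [List.tail_cons]
        omega
      have hlr : pvLastRun (x :: xs) = (z :: zs.takeWhile (fun w => w.1 == z.1)).reverse := by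
        unfold pvLastRun
        rw [hrev]
      unfold D_optimizeNoteSequence_py
      rw [htkw, hcnt, hlr]
      have hne : (x :: xs) ≠ [] := by simp
      simp only [hne, ne_eq, not_false_iff, true_and]
      by_cases hc : (pvNumRuns (x :: xs) - 1) % 2 = 0
      · simp only [hc, if_true, if_pos]
        rw [List.pairwise_reverse]
      · simp only [hc, if_false, if_neg, not_false_iff]
        rw [List.pairwise_reverse]

-- A and B over the run decomposition: all-but-last vs all, alternating parity
theorem pvParity (i : Nat) : (!decide (i % 2 = 0)) = decide ((i + 1) % 2 = 0) := by
  rcases Nat.mod_two_eq_zero_or_one i with h | h <;> simp [Nat.add_mod, h]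

theorem pvM2 (gs : List (List (Int × Int))) (g : List (Int × Int)) (i : Nat) :
    pvProcB i (g :: gs) =
      pvProcB i ((g :: gs).dropLast) ++
        pvSortKey (decide ((i + gs.length) % 2 = 0)) ((g :: gs).getLast (by simp)) := by
  induction gs generalizing g i with
  | nil => simp [pvProcB]
  | cons g' gs ih =>
    have := ih g' (i + 1)
    simp only [pvProcB, List.dropLast_cons₂, List.getLast_cons (l := g' :: gs) (by simp)] at *
    rw [this]
    simp [List.append_assoc, Nat.add_assoc, Nat.add_comm 1 gs.length]
    rfl

theorem pvM1 (gs : List (List (Int × Int))) (g : List (Int × Int)) (i : Nat) :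
    pvProcA (decide (i % 2 = 0)) (g :: gs) =
      pvProcB i ((g :: gs).dropLast) ++ (g :: gs).getLast (by simp) := by
  induction gs generalizing g i with
  | nil => simp [pvProcA, pvProcB]
  | cons g' gs ih =>
    have := ih g' (i + 1)
    simp only [pvProcA, pvProcB, List.dropLast_cons₂, List.getLast_cons (l := g' :: gs) (by simp),
      if_neg (List.cons_ne_nil g' gs)] at *
    rw [pvParity, this]
    simp [List.append_assoc]

-- glue: with at least one note, A is "prefix ++ last run" and B is "prefix ++ sorted last run"
theorem pvGlue (nL : List (Int × Int)) (h : nL ≠ []) :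
    ∃ P, optimizeNoteSequence_py nL = P ++ pvLastRun nL ∧
      optimizeNoteSequence_py_alt nL =
        P ++ pvSortKey (decide ((pvNumRuns nL - 1) % 2 = 0)) (pvLastRun nL) := by
  have hrne : pvRuns nL ≠ [] := by simpa [pvRuns_eq_nil_iff] using h
  obtain ⟨g, gs, hgs⟩ := List.exists_cons_of_ne_nil hrne
  refine ⟨pvProcB 0 ((g :: gs).dropLast), ?_, ?_⟩
  · rw [pvA_char nL]
    have h0 : (true : Bool) = decide ((0 : Nat) % 2 = 0) := by decide
    rw [hgs, h0, pvM1 gs g 0]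
    congr 1
    rw [← pvLastRun_eq nL h]
    congr 1
    exact hgs.symm
  · rw [pvB_char nL, hgs, pvM2 gs g 0]
    congr 1
    have hlen : pvNumRuns nL - 1 = gs.length := by
      rw [pvNumRuns_eq, hgs]; simp
    have hlast : (g :: gs).getLast (by simp) = pvLastRun nL := by
      rw [← pvLastRun_eq nL h]
      congr 1
      exact hgs.symm
    rw [hlast, hlen]
    norm_num

theorem pvSortKey_asc_of_pairwise (l : List (Int × Int))
    (hp : l.Pairwise (fun a b => a.2 ≤ b.2)) : pvSortKey true l = l := by
  unfold pvSortKey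
  exact PySem.List.sorted_eq_self_of_pairwise l _ (by simpa using hp)

theorem pvSortKey_desc_of_pairwise (l : List (Int × Int))
    (hp : l.Pairwise (fun a b => b.2 ≤ a.2)) : pvSortKey false l = l := by
  unfold pvSortKey
  refine PySem.List.sorted_eq_self_of_pairwise l _ ?_
  exact hp.imp (fun h => by simpa using h)

theorem pvSortKey_asc_pairwise (l : List (Int × Int)) :
    (pvSortKey true l).Pairwise (fun a b => a.2 ≤ b.2) := by
  have := PySem.List.sorted_pairwise l (fun x : Int × Int => if true then x.2 else -x.2)
  simpa [pvSortKey] using this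

theorem pvSortKey_desc_pairwise (l : List (Int × Int)) :
    (pvSortKey false l).Pairwise (fun a b => b.2 ≤ a.2) := by
  have := PySem.List.sorted_pairwise l (fun x : Int × Int => if false then x.2 else -x.2)
  exact (this).imp (fun h => by simp at h; omega)

-- ===== VERDICT (by name: the statement is the Claim_ definition above) =====
theorem optimizeNoteSequence_py_spec : Claim_unchanged_optimizeNoteSequence_py := by
  intro nL _ hnD
  rw [pvD_iff] at hnD
  by_cases h : nL = []
  · subst h; decide
  · obtain ⟨P, hA, hB⟩ := pvGlue nL h
    have hQ : (if (pvNumRuns nL - 1) % 2 = 0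
        then (pvLastRun nL).Pairwise (fun a b => a.2 ≤ b.2)
        else (pvLastRun nL).Pairwise (fun a b => b.2 ≤ a.2)) := by
      by_contra hq
      exact hnD ⟨h, hq⟩
    rw [hA, hB]
    by_cases hc : (pvNumRuns nL - 1) % 2 = 0
    · rw [if_pos hc] at hQ
      simp only [hc, decide_true]
      rw [pvSortKey_asc_of_pairwise _ hQ]
    · rw [if_neg hc] at hQ
      simp only [hc, decide_false]
      rw [pvSortKey_desc_of_pairwise _ hQ]

theorem optimizeNoteSequence_py_changed : Claim_changed_optimizeNoteSequence_py := by
  unfold Claim_changed_optimizeNoteSequence_py; decide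

theorem optimizeNoteSequence_py_tight : Claim_exact_optimizeNoteSequence_py := by
  intro nL _ hD heq
  rw [pvD_iff] at hD
  obtain ⟨h, hQ⟩ := hD
  obtain ⟨P, hA, hB⟩ := pvGlue nL h
  rw [hA, hB] at heq
  have hlast := List.append_cancel_left heq
  apply hQ
  by_cases hc : (pvNumRuns nL - 1) % 2 = 0
  · rw [if_pos hc]
    rw [hlast]
    simpa [hc] using pvSortKey_asc_pairwise (pvLastRun nL)
  · rw [if_neg hc]
    rw [hlast]
    simpa [hc] using pvSortKey_desc_pairwise (pvLastRun nL)
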